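-- pv_equiv track=rewrite | github.com/jclements3/trefoil | handout/trefoil_full.py | build_voice
-- ===== SOURCE A (Python) =====
-- def build_voice(tokens):
--     """48 quarter notes: 4 per bar, 6 bars per source line.
--     Double bar at segment boundaries every 8 chords (2 bars)."""
--     bars = []
--     for bar_idx in range(12):
--         start = bar_idx * 4
--         bar = ' '.join(tokens[start:start+4])
--         pos = (bar_idx + 1) * 4
--         if pos == 48:      sep = ' |]'
--         elif pos % 8 == 0: sep = ' ||'
--         else:              sep = ' |'
--         bars.append(bar + sep)
--     # Group 6 bars per line
--     lines = []
--     for i in range(0, len(bars), 6):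
--         lines.append(' '.join(bars[i:i+6]))
--     return '\n'.join(lines)
-- ===== SOURCE B (Python) =====
-- def build_voice(tokens):
--     """48 quarter notes: 4 per bar, 6 bars per source line.
--     Double bar at segment boundaries every 8 chords (2 bars)."""
--     # Table of (separator, glue) per bar: '||' every 2nd bar, '|]' at the end,
--     # '\n' after bar 6, '' after the last. One recursive pass consumes the
--     # tokens four at a time; no intermediate bar list, no regrouping.
--     seps = [' |', ' ||'] * 5 + [' |', ' |]']
--     glues = [' '] * 5 + ['\n'] + [' '] * 5 + ['']
--     def go(rest, table):
--         if not table: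
--             return ''
--         (sep, glue) = table[0]
--         return ' '.join(rest[:4]) + sep + glue + go(rest[4:], table[1:])
--     return go(list(tokens), list(zip(seps, glues)))
-- ===== Notes on version B (the rewrite author's own statement) =====
-- stated objective: simpler
-- what changed: B drops A's two staged passes (build a flat 12-bar list, then regroup it into lines and join) and instead makes one recursive pass that consumes the tokens four at a time, driven by a precomputed (separator, glue) table that already encodes the double-bar pattern and the line break, emitting the final string directly.
import Mathlib
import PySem

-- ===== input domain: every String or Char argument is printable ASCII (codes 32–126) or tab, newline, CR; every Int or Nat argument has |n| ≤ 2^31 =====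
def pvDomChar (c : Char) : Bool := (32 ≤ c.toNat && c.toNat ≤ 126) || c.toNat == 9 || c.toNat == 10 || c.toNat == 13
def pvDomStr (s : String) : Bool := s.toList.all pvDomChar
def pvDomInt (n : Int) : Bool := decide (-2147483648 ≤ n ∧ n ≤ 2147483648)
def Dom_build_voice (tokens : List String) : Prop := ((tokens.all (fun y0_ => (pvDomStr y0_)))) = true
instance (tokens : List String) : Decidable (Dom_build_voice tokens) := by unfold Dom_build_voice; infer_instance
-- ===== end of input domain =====

-- B replaces A's build-12-bars-then-regroup passes by a single recursive pass over a
-- precomputed (separator, glue) table, consuming the tokens four at a time; objective: simpler.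
-- ===== PORT A =====
def build_voice (tokens : List String) : String :=
  let bars := (PySem.List.pyRange 0 12 1).foldl (fun bars bar_idx =>
    let start := bar_idx * 4
    let bar := PySem.Str.join " " (PySem.List.slice tokens (some start) (some (start + 4)))
    let pos := (bar_idx + 1) * 4
    let sep := if pos == 48 then " |]" else if PySem.Int.mod pos 8 == 0 then " ||" else " |"
    bars ++ [bar ++ sep]) []
  let lines := (PySem.List.pyRange 0 (bars.length : Int) 6).foldl (fun lines i =>
    lines ++ [PySem.Str.join " " (PySem.List.slice bars (some i) (some (i + 6)))]) []
  PySem.Str.join "\n" lines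

-- ===== PORT B =====
-- rest[:4] / rest[4:] on lists with nonnegative literal bounds are List.take 4 / List.drop 4
def bvGo (rest : List String) (table : List (String × String)) : String :=
  match table with
  | [] => ""
  | (sep, glue) :: rest_table =>
      PySem.Str.join " " (rest.take 4) ++ sep ++ glue ++ bvGo (rest.drop 4) rest_table

def build_voice_alt (tokens : List String) : String :=
  bvGo tokens
    (List.zip ([" |", " ||", " |", " ||", " |", " ||", " |", " ||", " |", " ||"] ++ [" |", " |]"])
              ([" ", " ", " ", " ", " ", "\n"] ++ [" ", " ", " ", " ", " ", ""]))

-- ===== PRECONDITION & SPEC =====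
def Spec_build_voice (tokens : List String) (out : String) : Prop := out = build_voice_alt tokens
instance (tokens : List String) (out : String) : Decidable (Spec_build_voice tokens out) := by unfold Spec_build_voice; infer_instance

-- ===== CLAIM (what is proved, stated in full; the proofs are below) =====
def Claim_equal_build_voice : Prop := ∀ (tokens : List String), Dom_build_voice tokens → Spec_build_voice tokens (build_voice tokens)

-- ===== LEMMAS AND PROOFS =====
set_option maxHeartbeats 2000000 in
theorem build_voice_spec : Claim_equal_build_voice := by
  intro tokens _
  unfold Spec_build_voice build_voice build_voice_alt
  have h12 : PySem.List.pyRange 0 12 1 = [0,1,2,3,4,5,6,7,8,9,10,11] := by decide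
  have h126 : PySem.List.pyRange 0 12 6 = [0,6] := by decide
  have hs : ∀ (a b : Nat) (xs : List String),
      PySem.List.slice xs (some (a:Int)) (some (b:Int)) = (xs.drop a).take (b - a) :=
    fun a b xs => PySem.List.slice_natCast xs a b
  have e0 := fun xs : List String => hs 0 4 xs
  have e1 := fun xs : List String => hs 4 8 xs
  have e2 := fun xs : List String => hs 8 12 xs
  have e3 := fun xs : List String => hs 12 16 xs
  have e4 := fun xs : List String => hs 16 20 xs
  have e5 := fun xs : List String => hs 20 24 xs
  have e6 := fun xs : List String => hs 24 28 xs
  have e7 := fun xs : List String => hs 28 32 xs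
  have e8 := fun xs : List String => hs 32 36 xs
  have e9 := fun xs : List String => hs 36 40 xs
  have e10 := fun xs : List String => hs 40 44 xs
  have e11 := fun xs : List String => hs 44 48 xs
  have f0 := fun xs : List String => hs 0 6 xs
  have f1 := fun xs : List String => hs 6 12 xs
  norm_num at e0 e1 e2 e3 e4 e5 e6 e7 e8 e9 e10 e11 f0 f1
  simp [h12, h126, bvGo, List.zip, List.zipWith, e0, e1, e2, e3, e4, e5, e6, e7,
        e8, e9, e10, e11, f0, f1, PySem.Int.mod, PySem.Str.join, List.drop_drop,
        String.append_assoc]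
  refine String.ext ?_
  simp [PySem.Chars.join_cons_cons, PySem.Chars.join_singleton,
        String.toList_append, List.append_assoc]
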